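-- pv_equiv track=rewrite | github.com/aghilas1999/M2 | S1/TER/Code/Tess/ghi1.py | minimal_transversals
-- ===== SOURCE A (Python) =====
-- def minimal_transversals(HG, current_set=None, index=0):
--     if current_set is None:
--         current_set = set()
--
--     if index >= len(HG):
--         yield current_set
--         return
--
--     hyperedge = HG[index]
--     for vertex in hyperedge:
--         new_set = current_set.union({vertex})
--         if all(new_set.intersection(h) for h in HG[:index + 1]):
--             # Si new_set est une transversale jusqu'à présent, continuez récursivement
--             yield from minimal_transversals(HG, new_set, index + 1)
--         else:
--             # Si l'ajout de ce sommet ne forme pas une transversale, passez au suivant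
--             continue
--
--     # Vérifier si le current_set actuel est déjà une transversale pour tous les hyper-edges jusqu'à cet index
--     if all(current_set.intersection(h) for h in HG[:index + 1]):
--         yield current_set
-- ===== SOURCE B (Python) =====
-- def minimal_transversals(HG, current_set=None, index=0):
--     if current_set is None:
--         current_set = set()
--     n = len(HG)
--     if index >= n:
--         yield current_set
--         return
--     # edges among HG[:index+1] that current_set misses, computed ONCE here;
--     # the recursion below maintains this list instead of rescanning the prefix
--     missed = [h for h in HG[:index + 1] if not current_set & h]
--     yield from _extend(HG, current_set, index, missed, n)
--
--
-- def _extend(HG, cur, index, missed, n):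
--     # invariant: missed == [h for h in HG[:index+1] if not cur & h]
--     for v in HG[index]:
--         if all(v in h for h in missed):
--             new = cur | {v}
--             if index + 1 >= n:
--                 yield new
--             else:
--                 nxt = HG[index + 1]
--                 yield from _extend(HG, new, index + 1, [] if new & nxt else [nxt], n)
--     if not missed:
--         yield cur
-- ===== Notes on version B (the rewrite author's own statement) =====
-- stated objective: faster
-- what changed: A rescans the whole prefix HG[:index+1] for every candidate vertex at every level; B computes the list of prefix edges still missed by current_set once at entry and maintains it incrementally (at most one edge deep in the recursion), so each vertex is checked only against that list.
-- outside the precondition, e.g. on minimal_transversals([{1}, set()], {2, 3}, -2): A returns [{1, 2, 3}], B returns []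
import Mathlib
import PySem

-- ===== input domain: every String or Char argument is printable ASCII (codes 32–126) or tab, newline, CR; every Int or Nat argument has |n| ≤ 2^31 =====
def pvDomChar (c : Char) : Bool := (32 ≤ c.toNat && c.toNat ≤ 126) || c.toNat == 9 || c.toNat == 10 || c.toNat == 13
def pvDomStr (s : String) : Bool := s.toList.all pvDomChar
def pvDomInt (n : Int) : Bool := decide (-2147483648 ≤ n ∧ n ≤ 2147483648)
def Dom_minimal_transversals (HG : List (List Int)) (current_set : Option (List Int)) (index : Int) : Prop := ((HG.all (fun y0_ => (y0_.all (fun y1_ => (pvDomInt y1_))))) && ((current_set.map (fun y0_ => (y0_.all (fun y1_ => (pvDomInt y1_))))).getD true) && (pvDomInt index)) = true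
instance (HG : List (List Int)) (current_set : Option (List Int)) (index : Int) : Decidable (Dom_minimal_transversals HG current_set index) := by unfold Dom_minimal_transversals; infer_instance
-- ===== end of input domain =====

-- B replaces A's rescan of the whole prefix HG[:index+1] at every vertex by a list of the
-- still-missed prefix edges computed once and maintained incrementally (objective: faster).
-- Results are compared as a set of sets (Python yields sets; yield order/multiplicity is not part of the claim's comparison convention, but the ports are proved EQUAL as lists).

-- ===== PORT A =====
def minimal_transversals_go (HG : List (List Int)) (current_set : List Int) (index : Int) : List (List Int) :=
  if _h : (HG.length : Int) ≤ index then [current_set]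
  else
    match PySem.List.pyGet? HG index with
    | none => []  -- IndexError (index < -len(HG)); excluded by Pre_
    | some hyperedge =>
      (hyperedge.foldl (fun acc vertex =>
          let new_set := PySem.Set.union current_set [vertex]
          if (PySem.List.slice HG none (some (index + 1))).all
               (fun h => !(PySem.Set.inter new_set h).isEmpty) then
            acc ++ minimal_transversals_go HG new_set (index + 1)
          else acc) [])
      ++ (if (PySem.List.slice HG none (some (index + 1))).all
               (fun h => !(PySem.Set.inter current_set h).isEmpty) then
            [current_set] else [])
termination_by ((HG.length : Int) - index).toNat
decreasing_by omega

def minimal_transversals (HG : List (List Int)) (current_set : Option (List Int)) (index : Int) : List (List Int) :=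
  minimal_transversals_go HG (PySem.Set.ofList (current_set.getD [])) index

-- ===== PORT B =====
def minimal_transversals_extend (HG : List (List Int)) (cur : List Int) (index : Int) (missed : List (List Int)) (n : Int) : List (List Int) :=
  (match PySem.List.pyGet? HG index with
   | none => []  -- unreachable on the calls B makes (0 ≤ index < n = len(HG))
   | some edge =>
     edge.foldl (fun acc v =>
       if missed.all (fun h => PySem.Set.contains h v) then
         let new := PySem.Set.union cur [v]
         if _hn : n ≤ index + 1 then acc ++ [new]
         else
           let nxt := PySem.List.pyGetD HG (index + 1) []
           acc ++ minimal_transversals_extend HG new (index + 1)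
                    (if (PySem.Set.inter new nxt).isEmpty then [nxt] else []) n
       else acc) [])
  ++ (if missed.isEmpty then [cur] else [])
termination_by (n - index).toNat
decreasing_by omega

def minimal_transversals_alt (HG : List (List Int)) (current_set : Option (List Int)) (index : Int) : List (List Int) :=
  let cur := PySem.Set.ofList (current_set.getD [])
  let n : Int := HG.length
  if n ≤ index then [cur]
  else
    let missed := (PySem.List.slice HG none (some (index + 1))).filter
        (fun h => (PySem.Set.inter cur h).isEmpty)
    minimal_transversals_extend HG cur index missed n

-- ===== PRECONDITION & SPEC =====
-- Pre_ excludes a negative index (there A's slice HG[:index+1] wraps and no longer lists the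
-- edges preceding HG[index], an artefact of calling the recursion with a caller-supplied
-- negative counter, and for index < -len(HG) A raises IndexError); B counts from the front.
def Pre_minimal_transversals (HG : List (List Int)) (current_set : Option (List Int)) (index : Int) : Prop := 0 ≤ index
instance (HG : List (List Int)) (current_set : Option (List Int)) (index : Int) : Decidable (Pre_minimal_transversals HG current_set index) := by unfold Pre_minimal_transversals; infer_instance
def pvWitness_minimal_transversals : List (List Int) × Option (List Int) × Int := ([[1], [2]], none, 0)

def Spec_minimal_transversals (HG : List (List Int)) (current_set : Option (List Int)) (index : Int) (out : List (List Int)) : Prop := out = minimal_transversals_alt HG current_set index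
instance (HG : List (List Int)) (current_set : Option (List Int)) (index : Int) (out : List (List Int)) : Decidable (Spec_minimal_transversals HG current_set index out) := by unfold Spec_minimal_transversals; infer_instance

-- ===== CLAIM (what is proved, stated in full; the proofs are below) =====
def Claim_equal_minimal_transversals : Prop := ∀ (HG : List (List Int)) (current_set : Option (List Int)) (index : Int), Dom_minimal_transversals HG current_set index → Pre_minimal_transversals HG current_set index → Spec_minimal_transversals HG current_set index (minimal_transversals HG current_set index)

-- ===== LEMMAS AND PROOFS =====

lemma hit_union (cur h : List Int) (v : Int) :
    (!(PySem.Set.inter (PySem.Set.union cur [v]) h).isEmpty)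
      = (!(PySem.Set.inter cur h).isEmpty || PySem.Set.contains h v) := by
  rw [Bool.eq_iff_iff]
  simp [List.eq_nil_iff_forall_not_mem, PySem.Set.mem_inter, PySem.Set.mem_union]
  aesop

lemma all_filter_or (P : List (List Int)) (p : List Int → Bool) (q : List Int → Bool) :
    ((P.filter p).all q) = P.all (fun h => !p h || q h) := by
  induction P with
  | nil => rfl
  | cons a t ih =>
    simp only [List.filter_cons]
    cases hp : p a <;> simp [hp, ih]

lemma filter_isEmpty_eq_all (P : List (List Int)) (p : List Int → Bool) :
    (P.filter p).isEmpty = P.all (fun h => !p h) := by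
  induction P with
  | nil => rfl
  | cons a t ih =>
    simp only [List.filter_cons]
    cases hp : p a <;> simp [hp, ih]

lemma foldl_if_append {α β : Type} (l : List α) (c : α → Bool) (r : α → List β) (init : List β) :
    l.foldl (fun acc x => if c x then acc ++ r x else acc) init
      = init ++ l.flatMap (fun x => if c x then r x else []) := by
  induction l generalizing init with
  | nil => simp
  | cons a t ih => cases hc : c a <;> simp [hc, ih]

lemma go_eq_extend (k : Nat) : ∀ (HG : List (List Int)) (cur : List Int) (index : Int),
    0 ≤ index → index < (HG.length : Int) → ((HG.length : Int) - index).toNat = k →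
    minimal_transversals_go HG cur index =
      minimal_transversals_extend HG cur index
        ((PySem.List.slice HG none (some (index + 1))).filter
          (fun h => (PySem.Set.inter cur h).isEmpty)) (HG.length : Int) := by
  induction k using Nat.strong_induction_on with
  | h k IH =>
  intro HG cur index h0 hlt hk
  have hidx := PySem.List.pyGet?_eq_some_getElem (xs := HG) (i := index) h0 hlt
  rw [minimal_transversals_go, minimal_transversals_extend, dif_neg (by omega), hidx]
  dsimp only
  have hPt : PySem.List.slice HG none (some (index + 1)) = HG.take (index + 1).toNat := by
    exact PySem.List.slice_to HG (by omega)
  have hcond : ∀ v : Int,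
      (((PySem.List.slice HG none (some (index + 1))).filter
          (fun h => List.isEmpty (PySem.Set.inter cur h))).all (fun h => PySem.Set.contains h v))
        = ((PySem.List.slice HG none (some (index + 1))).all
            (fun h => !List.isEmpty (PySem.Set.inter (PySem.Set.union cur [v]) h))) := by
    intro v
    rw [all_filter_or]
    simp only [hit_union]
  congr 1
  · by_cases hn : (HG.length : Int) ≤ index + 1
    · simp only [dif_pos hn]
      rw [foldl_if_append, foldl_if_append]
      simp only [List.nil_append]
      congr 1
      funext v
      simp only [hcond v]
      split
      · rw [minimal_transversals_go, dif_pos hn]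
      · rfl
    · simp only [dif_neg hn]
      rw [foldl_if_append, foldl_if_append]
      simp only [List.nil_append]
      congr 1
      funext v
      simp only [hcond v]
      split
      next hc =>
        have hm : ((HG.length : Int) - (index + 1)).toNat < k := by omega
        rw [IH _ hm HG (PySem.Set.union cur [v]) (index + 1) (by omega) (by omega) rfl]
        congr 1
        rw [PySem.List.slice_to HG (by omega : (0:Int) ≤ index + 1 + 1)]
        have h2 : (index + 1 + 1).toNat = (index + 1).toNat + 1 := by omega
        rw [h2, List.take_add_one]
        have hlen : (index + 1).toNat < HG.length := by omega
        rw [List.getElem?_eq_getElem hlen]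
        rw [List.filter_append]
        have hnil : (HG.take (index + 1).toNat).filter
            (fun h => List.isEmpty (PySem.Set.inter (PySem.Set.union cur [v]) h)) = [] := by
          rw [List.filter_eq_nil_iff]
          intro h hmem
          rw [hPt] at hc
          have := List.all_eq_true.mp hc h hmem
          simp at this ⊢
          exact this
        rw [hnil]
        have hnxt : PySem.List.pyGetD HG (index + 1) ([] : List Int)
            = HG[(index + 1).toNat] := PySem.List.pyGetD_eq_getElem HG [] (by omega) (by omega)
        rw [hnxt]
        simp [List.filter_singleton]
      next => rfl
  · rw [filter_isEmpty_eq_all]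

-- ===== VERDICT (by name: the statement is the Claim_ definition above) =====
theorem minimal_transversals_spec : Claim_equal_minimal_transversals := by
  intro HG cs index _ hpre
  have h0 : 0 ≤ index := hpre
  unfold Spec_minimal_transversals minimal_transversals minimal_transversals_alt
  by_cases hge : ((HG.length : Int)) ≤ index
  · rw [minimal_transversals_go, dif_pos hge]
    simp [hge]
  · dsimp only
    rw [if_neg hge]
    exact go_eq_extend (((HG.length : Int) - index).toNat) HG _ index h0 (by omega) rfl
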